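-- pv_equiv track=rewrite | github.com/gaurav150/DSA | PRACTICE PATTERNS/floyds_triangle.py | generate_floyds_triangle
-- ===== SOURCE A (Python) =====
-- def generate_floyds_triangle(n):
--     """
--     Function to return the first n rows of Floyd's Triangle as a list of strings.
--
--     Parameters:
--     n (int): The number of rows in the triangle.
--
--     Returns:
--     list: A list of strings where each string represents a row of Floyd's Triangle.
--     """
--     # Your code here
--     lst = []
--     num = 1
--     for i in range(1, n + 1):
--         row = []
--         for j in range(i):
--             row.append(str(num))
--             num += 1
--         lst.append(" ".join(row))
--     return lst
-- ===== SOURCE B (Python) =====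
-- def generate_floyds_triangle(n):
--     """Same rows as A, but each row's first number is derived by the
--     triangular-number closed form instead of threading a counter."""
--     result = []
--     for i in range(1, n + 1):
--         start = i * (i - 1) // 2 + 1
--         result.append(" ".join(str(x) for x in range(start, start + i)))
--     return result
-- ===== Notes on version B (the rewrite author's own statement) =====
-- stated objective: alternative
-- what changed: Each row is computed independently from the closed-form start i*(i-1)//2+1 instead of threading a running counter across rows and building each row element-by-element with an accumulator.
import Mathlib
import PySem

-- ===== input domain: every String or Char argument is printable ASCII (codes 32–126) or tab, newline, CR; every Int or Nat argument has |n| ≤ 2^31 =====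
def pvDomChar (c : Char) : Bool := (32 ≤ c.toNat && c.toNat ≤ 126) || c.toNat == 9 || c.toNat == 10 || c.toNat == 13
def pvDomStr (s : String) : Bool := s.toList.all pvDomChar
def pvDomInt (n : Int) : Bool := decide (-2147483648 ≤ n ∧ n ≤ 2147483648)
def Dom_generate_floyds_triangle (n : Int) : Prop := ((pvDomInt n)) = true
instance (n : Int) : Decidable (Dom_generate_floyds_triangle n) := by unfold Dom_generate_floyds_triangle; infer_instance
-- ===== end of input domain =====

-- B computes each row independently from the closed-form start i*(i-1)//2+1
-- instead of threading a running counter across rows (objective: alternative decomposition).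

-- ===== PORT A =====
def generate_floyds_triangle (n : Int) : List String :=
  -- lst = []; num = 1; for i in range(1, n+1): row = []; for j in range(i): row.append(str(num)); num += 1; lst.append(" ".join(row))
  let st :=
    (PySem.List.pyRange 1 (n + 1) 1).foldl
      (fun (st : List String × Int) i =>
        let inner :=
          (PySem.List.pyRange 0 i 1).foldl
            (fun (rs : List String × Int) _j => (rs.1 ++ [PySem.Int.toStr rs.2], rs.2 + 1))
            ([], st.2)
        (st.1 ++ [PySem.Str.join " " inner.1], inner.2))
      ([], 1)
  st.1

-- ===== PORT B =====
def generate_floyds_triangle_alt (n : Int) : List String :=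
  (PySem.List.pyRange 1 (n + 1) 1).map (fun i =>
    let start := PySem.Int.floordiv (i * (i - 1)) 2 + 1
    PySem.Str.join " " ((PySem.List.pyRange start (start + i) 1).map PySem.Int.toStr))

-- ===== PRECONDITION & SPEC =====
def Spec_generate_floyds_triangle (n : Int) (out : List String) : Prop := out = generate_floyds_triangle_alt n
instance (n : Int) (out : List String) : Decidable (Spec_generate_floyds_triangle n out) := by unfold Spec_generate_floyds_triangle; infer_instance

-- ===== CLAIM (what is proved, stated in full; the proofs are below) =====
def Claim_equal_generate_floyds_triangle : Prop := ∀ (n : Int), Dom_generate_floyds_triangle n → Spec_generate_floyds_triangle n (generate_floyds_triangle n)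

-- ===== LEMMAS AND PROOFS =====

-- the closed-form start of row k+1 equals the counter accumulated over rows 1..k
theorem floordiv_tri (k : Nat) :
    PySem.Int.floordiv ((k + 1 : Int) * k) 2 = ((k * (k + 1) / 2 : Nat) : Int) := by
  rw [PySem.Int.floordiv_eq_ediv_of_pos (by norm_num)]
  have h : ((k + 1 : Int)) * k = ((k * (k + 1) : Nat) : Int) := by push_cast; ring
  rw [h]
  omega

-- inner loop: appending str(num), num+1 L times produces the numbers num..num+L-1
theorem inner_loop (L : Nat) (row : List String) (num : Int) :
    (List.range L).foldl
        (fun (rs : List String × Int) (_j : Nat) => (rs.1 ++ [PySem.Int.toStr rs.2], rs.2 + 1))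
        (row, num)
      = (row ++ (PySem.List.pyRange num (num + L) 1).map PySem.Int.toStr, num + L) := by
  induction L generalizing row num with
  | zero => simp [PySem.List.pyRange_one_eq_nil (le_refl num)]
  | succ m ih =>
      rw [List.range_succ, List.foldl_append, ih]
      have h : PySem.List.pyRange num (num + (↑m + 1)) 1
          = PySem.List.pyRange num (num + m) 1 ++ [num + m] := by
        have := PySem.List.pyRange_one_succ_right (a := num) (b := num + m) (by omega)
        simpa [add_assoc] using this
      simp [h, List.append_assoc, add_assoc]

-- the inner loop ignores j, so the fold over pyRange 0 i 1 is the fold over range i.toNat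
theorem inner_loop' (i : Int) (row : List String) (num : Int) :
    (PySem.List.pyRange 0 i 1).foldl
        (fun (rs : List String × Int) (_j : Int) => (rs.1 ++ [PySem.Int.toStr rs.2], rs.2 + 1))
        (row, num)
      = (row ++ (PySem.List.pyRange num (num + i.toNat) 1).map PySem.Int.toStr, num + i.toNat) := by
  rw [PySem.List.pyRange_one, List.foldl_map]
  have h0 : ((i : Int) - 0).toNat = i.toNat := by omega
  rw [h0]
  exact inner_loop i.toNat row num

-- outer loop invariant over the first L rows
theorem outer_loop (L : Nat) :
    (List.range L).foldl
        (fun (st : List String × Int) (k : Nat) =>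
          let i : Int := 1 + k
          let inner :=
            (PySem.List.pyRange 0 i 1).foldl
              (fun (rs : List String × Int) _j => (rs.1 ++ [PySem.Int.toStr rs.2], rs.2 + 1))
              ([], st.2)
          (st.1 ++ [PySem.Str.join " " inner.1], inner.2))
        ([], 1)
      = ((PySem.List.pyRange 1 (1 + L) 1).map (fun i =>
            let start := PySem.Int.floordiv (i * (i - 1)) 2 + 1
            PySem.Str.join " " ((PySem.List.pyRange start (start + i) 1).map PySem.Int.toStr)),
         ((L * (L + 1) / 2 : Nat) : Int) + 1) := by
  induction L with
  | zero => simp [PySem.List.pyRange_one_eq_nil (le_refl (1 : Int))]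
  | succ m ih =>
      rw [List.range_succ, List.foldl_append, ih]
      simp only [List.foldl_cons, List.foldl_nil]
      rw [inner_loop']
      have hrange : PySem.List.pyRange 1 (1 + (↑(m + 1) : Int)) 1
          = PySem.List.pyRange 1 (1 + m) 1 ++ [(1 + m : Int)] := by
        have := PySem.List.pyRange_one_succ_right (a := (1 : Int)) (b := 1 + m) (by omega)
        push_cast
        simpa [add_assoc] using this
      rw [hrange, List.map_append]
      have hstart : PySem.Int.floordiv ((1 + (m : Int)) * ((1 + m) - 1)) 2 + 1
          = ((m * (m + 1) / 2 : Nat) : Int) + 1 := by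
        have e : (1 + (m : Int)) * ((1 + m) - 1) = ((m : Int) + 1) * m := by ring
        rw [e, floordiv_tri m]
      have ht : (((1 : Int) + m).toNat : Int) = 1 + m := by omega
      have hnum : ((m * (m + 1) / 2 : Nat) : Int) + 1 + (1 + (m : Int))
          = (((m + 1) * (m + 1 + 1) / 2 : Nat) : Int) + 1 := by
        have h1 : m * (m + 1) % 2 = 0 := Nat.even_iff.mp (Nat.even_mul_succ_self m)
        have h2 : (m + 1) * (m + 1 + 1) = m * (m + 1) + 2 * (m + 1) := by ring
        omega
      rw [Prod.ext_iff]
      constructor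
      · rw [ht]
        simp only [List.map_cons, List.map_nil, List.nil_append, hstart]
      · rw [ht]
        exact hnum
-- ===== VERDICT (by name: the statement is the Claim_ definition above) =====
theorem generate_floyds_triangle_spec : Claim_equal_generate_floyds_triangle := by
  unfold Claim_equal_generate_floyds_triangle
  intro n _
  unfold Spec_generate_floyds_triangle generate_floyds_triangle generate_floyds_triangle_alt
  dsimp only
  rw [PySem.List.pyRange_one (a := 1) (b := n + 1), List.foldl_map, outer_loop]
  have hr : PySem.List.pyRange 1 (1 + (((n + 1 - 1).toNat : Nat) : Int)) 1
      = PySem.List.pyRange 1 (n + 1) 1 := by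
    rw [PySem.List.pyRange_one, PySem.List.pyRange_one]
    have h : ((1 : Int) + ((n + 1 - 1).toNat : Int) - 1).toNat = (n + 1 - 1).toNat := by omega
    rw [h]
  rw [hr]
  rw [← PySem.List.pyRange_one (a := 1) (b := n + 1)]
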